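-- pv_equiv track=rewrite | github.com/kingkoma/Coderbyte | try_letterchanges.py | LetterChanges
-- ===== SOURCE A (Python) =====
-- def LetterChanges(str):
--     new_str = ''
--     for i in str:
--         if i.isalpha():
--             if i == 'z':
--                 i = 'a'
--             elif i == 'Z':
--                 i = 'A'
--             else:
--                 i = chr(ord(i) + 1)
--                 if i in 'aeiou':
--                     i = i.upper()
--         else:
--             i = i
--         new_str += i
--     # code goes here
--     return new_str
-- ===== SOURCE B (Python) =====
-- _SRC = "abcdefghijklmnopqrstuvwxyzABCDEFGHIJKLMNOPQRSTUVWXYZ"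
-- _DST = "bcdEfghIjklmnOpqrstUvwxyzaBCDEFGHIJKLMNOPQRSTUVWXYZA"
-- _TABLE = dict(zip(_SRC, _DST))
--
-- def LetterChanges(str):
--     return ''.join(_TABLE.get(c, c) for c in str)
-- ===== Notes on version B (the rewrite author's own statement) =====
-- stated objective: faster
-- what changed: Replaces A's per-character if/elif branching and repeated string concatenation with a fixed 52-entry translation table built once as a module constant and a single join over table lookups.
import Mathlib
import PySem

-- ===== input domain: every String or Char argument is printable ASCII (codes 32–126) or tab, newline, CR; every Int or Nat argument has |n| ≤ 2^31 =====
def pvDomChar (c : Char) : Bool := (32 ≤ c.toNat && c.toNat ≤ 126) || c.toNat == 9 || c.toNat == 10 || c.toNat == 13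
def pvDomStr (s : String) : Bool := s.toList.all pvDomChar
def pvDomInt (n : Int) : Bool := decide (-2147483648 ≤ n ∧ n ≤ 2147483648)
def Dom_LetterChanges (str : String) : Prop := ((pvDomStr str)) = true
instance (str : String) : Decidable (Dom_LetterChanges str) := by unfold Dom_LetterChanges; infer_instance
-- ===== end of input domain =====

-- B replaces A's per-character if/elif branching with one fixed 52-letter translation table and a single lookup pass (same O(n) cost; idiomatic).

-- ===== PORT A =====
-- the body of A's for-loop: one character transformed
def pvStepA (i : Char) : Char :=
  if PySem.Chars.isalpha i then
    if i = 'z' then 'a'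
    else if i = 'Z' then 'A'
    else
      let j := Char.ofNat (i.toNat + 1)          -- chr(ord(i) + 1)
      if ['a', 'e', 'i', 'o', 'u'].contains j then PySem.Chars.upperChar j else j
  else i

def LetterChanges (str : String) : String :=
  String.mk (str.toList.foldl (fun new_str i => new_str ++ [pvStepA i]) [])

-- ===== PORT B =====
def pvSrc : List Char := "abcdefghijklmnopqrstuvwxyzABCDEFGHIJKLMNOPQRSTUVWXYZ".toList
def pvDst : List Char := "bcdEfghIjklmnOpqrstUvwxyzaBCDEFGHIJKLMNOPQRSTUVWXYZA".toList
def pvTable : PySem.Dict Char Char := PySem.Dict.ofList (pvSrc.zip pvDst)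

def LetterChanges_alt (str : String) : String :=
  String.mk (str.toList.map (fun c => pvTable.getD c c))

-- ===== PRECONDITION & SPEC =====
def Spec_LetterChanges (str : String) (out : String) : Prop := out = LetterChanges_alt str
instance (str : String) (out : String) : Decidable (Spec_LetterChanges str out) := by unfold Spec_LetterChanges; infer_instance

-- ===== CLAIM (what is proved, stated in full; the proofs are below) =====
def Claim_equal_LetterChanges : Prop := ∀ (str : String), Dom_LetterChanges str → Spec_LetterChanges str (LetterChanges str)

-- ===== LEMMAS AND PROOFS =====
set_option maxRecDepth 8000 in
theorem pvStep_letter : ∀ n : Nat, (97 ≤ n ∧ n ≤ 122) ∨ (65 ≤ n ∧ n ≤ 90) →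
    pvStepA (Char.ofNat n) = pvTable.getD (Char.ofNat n) (Char.ofNat n) := by
  intro n hn
  rcases hn with ⟨h1, h2⟩ | ⟨h1, h2⟩ <;> interval_cases n <;> decide

theorem pvTable_keys_alpha : ∀ p ∈ (pvSrc.zip pvDst), PySem.Chars.isalpha p.1 = true := by
  decide

set_option maxRecDepth 8000 in
theorem pvStep_eq_table (c : Char) : pvStepA c = pvTable.getD c c := by
  by_cases h : PySem.Chars.isalpha c = true
  · have hb : (97 ≤ c.toNat ∧ c.toNat ≤ 122) ∨ (65 ≤ c.toNat ∧ c.toNat ≤ 90) := by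
      simp only [PySem.Chars.isalpha, PySem.Chars.islower, PySem.Chars.isupper,
        Bool.or_eq_true, Bool.and_eq_true, decide_eq_true_eq, Char.le_def,
        UInt32.le_iff_toNat_le, Char.toNat_val, Char.reduceToNat] at h
      omega
    have := pvStep_letter c.toNat hb
    rwa [Char.ofNat_toNat] at this
  · have hc : pvTable.contains c = false := by
      by_contra hcc
      have hcc' : pvTable.contains c = true := by
        cases hx : pvTable.contains c
        · exact absurd hx hcc
        · rfl
      unfold PySem.Dict.contains at hcc'
      obtain ⟨p, hp, hpe⟩ := List.any_eq_true.mp hcc'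
      have hitems : pvTable.items = pvSrc.zip pvDst := by decide
      rw [hitems] at hp
      have halpha := pvTable_keys_alpha p hp
      rw [eq_of_beq hpe] at halpha
      exact h halpha
    rw [PySem.Dict.getD_of_not_contains _ _ hc]
    simp [pvStepA, h]

-- ===== VERDICT (by name: the statement is the Claim_ definition above) =====
theorem LetterChanges_spec : Claim_equal_LetterChanges := by
  intro str _
  unfold Spec_LetterChanges LetterChanges LetterChanges_alt
  rw [PySem.List.foldl_append_singleton_eq_map]
  simp only [List.nil_append]
  exact congrArg String.mk (List.map_congr_left (fun c _ => pvStep_eq_table c))
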